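-- pv_equiv track=rewrite | github.com/DragosBadarau/Python2022 | Lab2.py | can_not_see
-- ===== SOURCE A (Python) =====
-- def can_not_see(seats):
--     "Returns the seats that have a smaller value than any seat in the front row "
--     unlucky=[]
--     for index,row in enumerate(seats):
--         for column, value in enumerate(row):
--             aux=index-1
--             while(aux>=0):
--                 if(seats[aux][column]>value):
--                     aux=0
--                     unlucky.append((index,column))
--                 aux-=1
--     return unlucky
-- ===== SOURCE B (Python) =====
-- def can_not_see(seats):
--     "Returns the seats that have a smaller value than any seat in the front row "
--     # Single pass: keep the running per-column maximum of the rows seen so far.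
--     unlucky = []
--     colmax = []
--     for index, row in enumerate(seats):
--         for column, value in enumerate(row):
--             if column < len(colmax):
--                 m = colmax[column]
--                 if m > value:
--                     unlucky.append((index, column))
--                 if value > m:
--                     colmax[column] = value
--             else:
--                 colmax.append(value)
--     return unlucky
-- ===== Notes on version B (the rewrite author's own statement) =====
-- stated objective: faster
-- what changed: Replaces the per-seat backward scan over all earlier rows with a single pass that maintains a running per-column maximum, appending a seat exactly when that maximum exceeds its value.
import Mathlib
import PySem

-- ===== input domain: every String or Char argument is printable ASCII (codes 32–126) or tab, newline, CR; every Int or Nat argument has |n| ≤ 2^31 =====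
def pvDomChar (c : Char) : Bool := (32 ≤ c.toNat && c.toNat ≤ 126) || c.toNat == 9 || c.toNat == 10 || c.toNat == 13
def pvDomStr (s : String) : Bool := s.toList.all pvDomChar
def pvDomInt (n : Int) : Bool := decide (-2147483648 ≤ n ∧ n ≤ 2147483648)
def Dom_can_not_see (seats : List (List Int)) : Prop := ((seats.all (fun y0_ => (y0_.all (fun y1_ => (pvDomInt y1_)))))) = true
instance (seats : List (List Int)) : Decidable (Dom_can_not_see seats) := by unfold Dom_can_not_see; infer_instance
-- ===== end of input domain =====

-- B replaces A's quadratic backward scan over all earlier rows with one pass keeping a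
-- running per-column maximum (asymptotically faster, measured).

-- ===== PORT A =====
-- Inner `while aux >= 0` loop of A: fuel n stands for aux = n - 1; on a hit A sets
-- aux to 0, appends, then decrements aux to -1, i.e. it appends once and exits.
-- The `none` branches are Python's IndexError (outside Pre_); the value there is unspecified.
def pvWhileA (seats : List (List Int)) (index column value : Int) :
    Nat → List (Int × Int) → List (Int × Int)
  | 0, unlucky => unlucky
  | n + 1, unlucky =>
    match PySem.List.pyGet? seats (n : Int) with
    | none => unlucky
    | some row =>
      match PySem.List.pyGet? row column with
      | none => unlucky
      | some x =>
        if value < x then unlucky ++ [(index, column)]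
        else pvWhileA seats index column value n unlucky

def can_not_see (seats : List (List Int)) : List (Int × Int) :=
  (PySem.List.enumerate seats 0).foldl
    (fun unlucky ir =>
      (PySem.List.enumerate ir.2 0).foldl
        (fun unlucky cv => pvWhileA seats ir.1 cv.1 cv.2 ir.1.toNat unlucky)
        unlucky)
    []

-- ===== PORT B =====
-- one seat (column, value) of a row: compare with / update the running column maximum
def pvColStep (index : Int) (st : List (Int × Int) × List Int) (cv : Int × Int) :
    List (Int × Int) × List Int :=
  if cv.1 < (st.2.length : Int) then
    let m := PySem.List.pyGetD st.2 cv.1 0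
    ((if cv.2 < m then st.1 ++ [(index, cv.1)] else st.1),
     (if m < cv.2 then PySem.List.pySetD st.2 cv.1 cv.2 else st.2))
  else (st.1, st.2 ++ [cv.2])

def can_not_see_alt (seats : List (List Int)) : List (Int × Int) :=
  ((PySem.List.enumerate seats 0).foldl
    (fun st ir => (PySem.List.enumerate ir.2 0).foldl (pvColStep ir.1) st)
    (([], []) : List (Int × Int) × List Int)).1

-- ===== PRECONDITION & SPEC =====
-- A indexes every earlier row at the current column, so it raises IndexError exactly
-- when some row is longer than a row above it; Pre_ admits precisely the inputs on
-- which the Python A returns (row lengths non-increasing).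
def Pre_can_not_see (seats : List (List Int)) : Prop :=
  List.Pairwise (fun a b => b.length ≤ a.length) seats
instance (seats : List (List Int)) : Decidable (Pre_can_not_see seats) := by
  unfold Pre_can_not_see; infer_instance

def pvWitness_can_not_see : List (List Int) := [[1, 2], [3]]

def Spec_can_not_see (seats : List (List Int)) (out : List (Int × Int)) : Prop := out = can_not_see_alt seats
instance (seats : List (List Int)) (out : List (Int × Int)) : Decidable (Spec_can_not_see seats out) := by unfold Spec_can_not_see; infer_instance

-- ===== CLAIM (what is proved, stated in full; the proofs are below) =====
def Claim_equal_can_not_see : Prop := ∀ (seats : List (List Int)), Dom_can_not_see seats → Pre_can_not_see seats → Spec_can_not_see seats (can_not_see seats)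

-- ===== LEMMAS AND PROOFS =====

-- the state of B's fold after the whole input
def pvBState (seats : List (List Int)) : List (Int × Int) × List Int :=
  (PySem.List.enumerate seats 0).foldl
    (fun st ir => (PySem.List.enumerate ir.2 0).foldl (pvColStep ir.1) st)
    (([], []) : List (Int × Int) × List Int)

-- pointwise running-max update of the column maxima by one row, starting at column s
def pvBump : List Int → Nat → List Int → List Int
  | cm, _, [] => cm
  | cm, s, v :: t => pvBump (if cm.getD s 0 < v then cm.set s v else cm) (s + 1) t

-- invariant tying B's column-maximum list to the rows already processed
def pvColInv (seats : List (List Int)) (cm : List Int) : Prop :=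
  cm.length = (seats.headD []).length ∧
  ∀ c : Nat, c < cm.length →
    (∀ x ∈ seats, c < x.length → x.getD c 0 ≤ cm.getD c 0) ∧
    (∃ x ∈ seats, c < x.length ∧ x.getD c 0 = cm.getD c 0)

theorem pvWhileA_eq (seats : List (List Int)) (index c v : Int) :
    ∀ (n : Nat), n ≤ seats.length → 0 ≤ c →
    (∀ k < n, c < ((seats.getD k []).length : Int)) →
    ∀ u, pvWhileA seats index c v n u
      = u ++ (if (seats.take n).any (fun x => decide (v < PySem.List.pyGetD x c 0)) = true
              then [(index, c)] else []) := by
  intro n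
  induction n with
  | zero => intro _ _ _ u; simp [pvWhileA]
  | succ n ih =>
    intro hn hc hcl u
    have hnlen : n < seats.length := hn
    have hrow : PySem.List.pyGet? seats (n : Int) = some seats[n] := by
      rw [PySem.List.pyGet?_natCast]; simp [hnlen]
    have hclen : c < ((seats[n] : List Int).length : Int) := by
      have := hcl n (Nat.lt_succ_self n)
      rwa [List.getD_eq_getElem _ _ hnlen] at this
    have hx : PySem.List.pyGet? seats[n] c = some (seats[n].getD c.toNat 0) := by
      rw [PySem.List.pyGet?_eq_some_getElem _ hc hclen]
      rw [List.getD_eq_getElem _ _ (by omega)]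
    have htake : seats.take (n + 1) = seats.take n ++ [seats[n]] := by
      rw [List.take_add_one, List.getElem?_eq_getElem hnlen]; rfl
    have hgd : PySem.List.pyGetD seats[n] c 0 = seats[n].getD c.toNat 0 := by
      rw [PySem.List.pyGetD_of_nonneg _ _ hc]
    rw [pvWhileA, hrow]
    dsimp only
    rw [hx]
    dsimp only
    by_cases hv : v < seats[n].getD c.toNat 0
    · simp only [if_pos hv, htake, List.any_append, List.any_cons, List.any_nil, hgd]
      rw [List.getD_eq_getElem?_getD] at hv
      simp [hv]
    · rw [if_neg hv, ih (by omega) hc (fun k hk => hcl k (by omega)) u]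
      simp only [htake, List.any_append, List.any_cons, List.any_nil, hgd]
      rw [List.getD_eq_getElem?_getD] at hv
      simp [hv]

theorem pvWhileA_stable (P : List (List Int)) (r : List Int) (index c v : Int) :
    ∀ (n : Nat), n ≤ P.length → ∀ u,
      pvWhileA (P ++ [r]) index c v n u = pvWhileA P index c v n u := by
  intro n
  induction n with
  | zero => intro _ u; rfl
  | succ n ih =>
    intro hn u
    have hget : PySem.List.pyGet? (P ++ [r]) (n : Int) = PySem.List.pyGet? P (n : Int) := by
      rw [PySem.List.pyGet?_natCast, PySem.List.pyGet?_natCast,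
        List.getElem?_append_left (by omega)]
    rw [pvWhileA, pvWhileA, hget]
    cases PySem.List.pyGet? P (n : Int) with
    | none => rfl
    | some row =>
      dsimp only
      cases PySem.List.pyGet? row c with
      | none => rfl
      | some x =>
        dsimp only
        by_cases hv : v < x
        · simp [hv]
        · simp only [if_neg hv]; exact ih (by omega) u

theorem pvRowA_eq (seats : List (List Int)) (index : Int) (n : Nat)
    (hn : n ≤ seats.length) :
    ∀ (row : List Int) (s : Nat) (u : List (Int × Int)),
    (∀ c : Nat, s ≤ c → c < s + row.length → ∀ k < n, c < (seats.getD k []).length) →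
    (PySem.List.enumerate row (s : Int)).foldl
        (fun u cv => pvWhileA seats index cv.1 cv.2 n u) u
      = u ++ (PySem.List.enumerate row (s : Int)).flatMap
          (fun cv => if ((seats.take n).any (fun x => decide (cv.2 < PySem.List.pyGetD x cv.1 0))) = true
                     then [(index, cv.1)] else []) := by
  intro row
  induction row with
  | nil => intro s u _; simp [PySem.List.enumerate_nil]
  | cons v t ih =>
    intro s u hcl
    rw [PySem.List.enumerate_cons, List.foldl_cons, List.flatMap_cons]
    have hs : ((s : Int)) + 1 = ((s + 1 : Nat) : Int) := by push_cast; ring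
    have hhead := pvWhileA_eq seats index (s : Int) v n hn (by positivity)
      (fun k hk => by
        have := hcl s (le_refl s) (by simp) k hk
        exact_mod_cast this) u
    rw [hs, hhead, ih (s + 1) _ (fun c hc1 hc2 k hk => hcl c (by omega) (by simp at hc2 ⊢; omega) k hk)]
    rw [List.append_assoc]

theorem pvRowB_fill (index : Int) :
    ∀ (r : List Int) (s : Nat) (u : List (Int × Int)) (cm : List Int), cm.length = s →
      (PySem.List.enumerate r (s : Int)).foldl (pvColStep index) (u, cm) = (u, cm ++ r) := by
  intro r
  induction r with
  | nil => intro s u cm _; simp [PySem.List.enumerate_nil]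
  | cons v t ih =>
    intro s u cm hlen
    rw [PySem.List.enumerate_cons, List.foldl_cons]
    have hstep : pvColStep index (u, cm) ((s : Int), v) = (u, cm ++ [v]) := by
      unfold pvColStep
      rw [if_neg (by simp [hlen])]
    rw [hstep]
    have hs : ((s : Int)) + 1 = ((s + 1 : Nat) : Int) := by push_cast; ring
    rw [hs, ih (s + 1) u (cm ++ [v]) (by simp [hlen])]
    simp

theorem pvRowB_eq (index : Int) :
    ∀ (r : List Int) (s : Nat) (u : List (Int × Int)) (cm : List Int),
      s + r.length ≤ cm.length →
      (PySem.List.enumerate r (s : Int)).foldl (pvColStep index) (u, cm)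
        = (u ++ (PySem.List.enumerate r (s : Int)).flatMap
              (fun cv => if decide (cv.2 < PySem.List.pyGetD cm cv.1 0) = true
                         then [(index, cv.1)] else []),
           pvBump cm s r) := by
  intro r
  induction r with
  | nil => intro s u cm _; simp [PySem.List.enumerate_nil, pvBump]
  | cons v t ih =>
    intro s u cm hlen
    rw [PySem.List.enumerate_cons, List.foldl_cons, List.flatMap_cons]
    have hslen : s < cm.length := by simp at hlen; omega
    have hm : PySem.List.pyGetD cm (s : Int) 0 = cm.getD s 0 := by
      rw [PySem.List.pyGetD_natCast]
    have hstep : pvColStep index (u, cm) ((s : Int), v)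
        = ((if v < cm.getD s 0 then u ++ [(index, (s : Int))] else u),
           (if cm.getD s 0 < v then cm.set s v else cm)) := by
      unfold pvColStep
      dsimp only
      rw [if_pos (by exact_mod_cast hslen)]
      rw [hm, PySem.List.pySetD_natCast]
    rw [hstep]
    have hs : ((s : Int)) + 1 = ((s + 1 : Nat) : Int) := by push_cast; ring
    set cm' := if cm.getD s 0 < v then cm.set s v else cm with hcm'
    have hlen' : (s + 1) + t.length ≤ cm'.length := by
      rw [hcm']; split <;> simp at hlen ⊢ <;> omega
    rw [hs, ih (s + 1) _ cm' hlen']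
    dsimp only
    simp only [Prod.mk.injEq]
    constructor
    · -- the unlucky components agree
      have hflat : List.flatMap
            (fun cv => if decide (cv.2 < PySem.List.pyGetD cm' cv.1 0) = true then [(index, cv.1)] else [])
            (PySem.List.enumerate t ((s + 1 : Nat) : Int))
          = List.flatMap
            (fun cv => if decide (cv.2 < PySem.List.pyGetD cm cv.1 0) = true then [(index, cv.1)] else [])
            (PySem.List.enumerate t ((s + 1 : Nat) : Int)) := by
        apply List.flatMap_congr
        intro cv hcv
        obtain ⟨k, hk, rfl⟩ := (PySem.List.mem_enumerate_iff _ _ _).mp hcv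
        have hget : cm'.getD (s + 1 + k) 0 = cm.getD (s + 1 + k) 0 := by
          rw [hcm']; split
          · rw [List.getD_eq_getElem?_getD, List.getD_eq_getElem?_getD,
              List.getElem?_set_ne (by omega)]
          · rfl
        have hc : (((s + 1 : Nat) : Int) + (k : Int)) = (((s + 1 + k : Nat)) : Int) := by
          push_cast; ring
        rw [hc, PySem.List.pyGetD_natCast, PySem.List.pyGetD_natCast, hget]
      rw [hflat, hm, ← List.append_assoc]
      simp only [decide_eq_true_eq]
      congr 1
      split <;> simp
    · -- the column maxima agree
      rw [hcm']; rfl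

theorem pvBump_length : ∀ (r cm : List Int) (s : Nat),
    (pvBump cm s r).length = cm.length := by
  intro r
  induction r with
  | nil => intro cm s; rfl
  | cons v t ih =>
    intro cm s
    rw [pvBump, ih]
    split <;> simp

theorem pvBump_getD : ∀ (r cm : List Int) (s : Nat), s + r.length ≤ cm.length →
    ∀ c : Nat, c < cm.length →
    (pvBump cm s r).getD c 0
      = if s ≤ c ∧ c < s + r.length then max (cm.getD c 0) (r.getD (c - s) 0)
        else cm.getD c 0 := by
  intro r
  induction r with
  | nil => intro cm s _ c _; simp [pvBump]
  | cons v t ih =>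
    intro cm s hlen c hc
    rw [pvBump]
    set cm' := if cm.getD s 0 < v then cm.set s v else cm with hcm'
    have hlen' : cm'.length = cm.length := by rw [hcm']; split <;> simp
    have hslen : s < cm.length := by simp at hlen; omega
    have hgd' : ∀ k : Nat, cm'.getD k 0
        = if k = s then max (cm.getD s 0) v else cm.getD k 0 := by
      intro k
      rw [hcm']
      by_cases hk : k = s
      · subst hk
        by_cases h : cm.getD k 0 < v
        · rw [if_pos h, if_pos rfl]
          have : (cm.set k v).getD k 0 = v := by
            simp [List.getD_eq_getElem?_getD, hslen]
          rw [this, max_eq_right (le_of_lt h)]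
        · rw [if_neg h, if_pos rfl, max_eq_left (le_of_not_gt h)]
      · by_cases h : cm.getD s 0 < v
        · rw [if_pos h, if_neg hk, List.getD_eq_getElem?_getD,
            List.getElem?_set_ne (by omega), List.getD_eq_getElem?_getD]
        · rw [if_neg h, if_neg hk]
    rw [ih cm' (s + 1) (by simp at hlen ⊢; omega) c (by omega)]
    by_cases hc1 : c = s
    · subst hc1
      rw [if_neg (by omega), hgd' c, if_pos rfl]
      simp
    · by_cases hc2 : s + 1 ≤ c ∧ c < s + 1 + t.length
      · rw [if_pos hc2, if_pos (by simp; omega), hgd' c, if_neg hc1]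
        have : c - s = (c - (s + 1)) + 1 := by omega
        rw [this]
        simp
      · rw [if_neg hc2, hgd' c, if_neg hc1, if_neg (by simp; omega)]

theorem pvMainInv : ∀ (seats : List (List Int)), Pre_can_not_see seats →
    (pvBState seats).1 = can_not_see seats ∧ pvColInv seats (pvBState seats).2 := by
  intro seats
  induction seats using List.reverseRecOn with
  | nil =>
    intro _
    exact ⟨rfl, rfl, fun c hc => absurd hc (by simp [pvBState])⟩
  | append_singleton P r ih =>
    intro hP
    have hPP : Pre_can_not_see P :=
      List.Pairwise.sublist (List.sublist_append_left P [r]) hP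
    have hall : ∀ x ∈ P, r.length ≤ x.length := by
      intro x hx
      have := (List.pairwise_append.mp hP).2.2 x hx r (by simp)
      exact this
    obtain ⟨hu, hinv⟩ := ih hPP
    -- unfold B's fold over the appended row
    have hB : pvBState (P ++ [r])
        = (PySem.List.enumerate r ((0 : Nat) : Int)).foldl
            (pvColStep ((P.length : Int))) (pvBState P) := by
      unfold pvBState
      rw [PySem.List.enumerate_append, List.foldl_append]
      simp [PySem.List.enumerate_cons, PySem.List.enumerate_nil]
    -- unfold A's fold over the appended row
    have hA : can_not_see (P ++ [r])
        = can_not_see P ++ (PySem.List.enumerate r ((0 : Nat) : Int)).flatMap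
            (fun cv => if (P.any (fun x => decide (cv.2 < PySem.List.pyGetD x cv.1 0))) = true
                       then [((P.length : Int), cv.1)] else []) := by
      unfold can_not_see
      rw [PySem.List.enumerate_append, List.foldl_append]
      have hpre : (PySem.List.enumerate P (0 : Int)).foldl
          (fun unlucky ir => (PySem.List.enumerate ir.2 0).foldl
            (fun unlucky cv => pvWhileA (P ++ [r]) ir.1 cv.1 cv.2 ir.1.toNat unlucky) unlucky) []
          = (PySem.List.enumerate P (0 : Int)).foldl
          (fun unlucky ir => (PySem.List.enumerate ir.2 0).foldl
            (fun unlucky cv => pvWhileA P ir.1 cv.1 cv.2 ir.1.toNat unlucky) unlucky) [] := by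
        apply PySem.List.foldl_congr_mem
        intro acc ir hir
        obtain ⟨k, hk, rfl⟩ := (PySem.List.mem_enumerate_iff _ _ _).mp hir
        apply PySem.List.foldl_congr_mem
        intro acc2 cv _
        apply pvWhileA_stable
        simp
        omega
      rw [hpre]
      have hlast : PySem.List.enumerate [r] ((0 : Int) + (P.length : Int))
          = [((P.length : Int), r)] := by
        simp [PySem.List.enumerate_cons, PySem.List.enumerate_nil]
      rw [hlast, List.foldl_cons, List.foldl_nil]
      have hfuel : ((P.length : Int)).toNat = P.length := by simp
      have := pvRowA_eq (P ++ [r]) ((P.length : Int)) P.length (by simp) r 0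
        (can_not_see P)
        (fun c hc1 hc2 k hk => by
          have hk2 : k < (P ++ [r]).length := by simp; omega
          rw [List.getD_eq_getElem _ _ hk2, List.getElem_append_left hk]
          have : r.length ≤ P[k].length := hall P[k] (List.getElem_mem hk)
          simp at hc2
          omega)
      simp only [hfuel]
      rw [Nat.cast_zero, List.take_left' rfl] at this
      exact this
    rcases eq_or_ne P [] with hPe | hPe
    · -- first row: every column just seeds the running maxima
      subst hPe
      have hfill := pvRowB_fill ((0 : Int)) r 0 [] [] rfl
      have hB2 : pvBState ([] ++ [r]) = ([], r) := by
        rw [hB]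
        simpa using hfill
      have hA2 : can_not_see ([] ++ [r]) = [] := by
        rw [hA]
        simp
        rfl
      rw [hB2, hA2]
      refine ⟨rfl, by simp, fun c hc => ⟨?_, ?_⟩⟩
      · intro x hx _
        simp at hx
        subst hx
        exact le_refl _
      · exact ⟨r, by simp, by simpa using hc, rfl⟩
    · -- later rows: compare against, then merge into, the running maxima
      have hhead : P.headD [] ∈ P := by
        cases P with
        | nil => exact absurd rfl hPe
        | cons p t => simp
      have hcmlen : (pvBState P).2.length = (P.headD []).length := hinv.1
      have hrlen : r.length ≤ (pvBState P).2.length := by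
        rw [hcmlen]; exact hall _ hhead
      have hB2 : pvBState (P ++ [r])
          = ((pvBState P).1 ++ (PySem.List.enumerate r ((0 : Nat) : Int)).flatMap
                (fun cv => if decide (cv.2 < PySem.List.pyGetD (pvBState P).2 cv.1 0) = true
                           then [((P.length : Int), cv.1)] else []),
             pvBump (pvBState P).2 0 r) := by
        rw [hB, ← pvRowB_eq ((P.length : Int)) r 0 (pvBState P).1 (pvBState P).2 (by simpa using hrlen)]
      have hLL : (PySem.List.enumerate r ((0 : Nat) : Int)).flatMap
              (fun cv => if decide (cv.2 < PySem.List.pyGetD (pvBState P).2 cv.1 0) = true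
                         then [((P.length : Int), cv.1)] else [])
          = (PySem.List.enumerate r ((0 : Nat) : Int)).flatMap
              (fun cv => if (P.any (fun x => decide (cv.2 < PySem.List.pyGetD x cv.1 0))) = true
                         then [((P.length : Int), cv.1)] else []) := by
        apply List.flatMap_congr
        intro cv hcv
        obtain ⟨k, hk, rfl⟩ := (PySem.List.mem_enumerate_iff _ _ _).mp hcv
        have hcast : (((0 : Nat) : Int) + (k : Int)) = ((k : Nat) : Int) := by push_cast; ring
        have hkcm : k < (pvBState P).2.length := by omega
        obtain ⟨hbound, w, hw, hwlen, hweq⟩ := hinv.2 k hkcm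
        have hiff : (r[k] < (pvBState P).2.getD k 0) ↔ ∃ x ∈ P, r[k] < x.getD k 0 := by
          constructor
          · intro h; exact ⟨w, hw, by rw [← hweq] at h; exact h⟩
          · rintro ⟨x, hx, hlt⟩
            exact lt_of_lt_of_le hlt (hbound x hx (by have := hall x hx; omega))
        dsimp only
        rw [hcast, PySem.List.pyGetD_natCast]
        have : (P.any (fun x => decide (r[k] < PySem.List.pyGetD x ((k : Nat) : Int) 0)))
            = decide (r[k] < (pvBState P).2.getD k 0) := by
          simp only [PySem.List.pyGetD_natCast]
          rw [Bool.eq_iff_iff]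
          simp only [List.any_eq_true, decide_eq_true_eq]
          exact hiff.symm
        rw [this]
      constructor
      · rw [hB2, hA, hLL, hu]
      · -- the invariant after merging row r
        rw [hB2]
        dsimp only
        have hblen : (pvBump (pvBState P).2 0 r).length = (pvBState P).2.length :=
          pvBump_length r _ 0
        have hgd := pvBump_getD r (pvBState P).2 0 (by simpa using hrlen)
        refine ⟨?_, fun c hc => ?_⟩
        · rw [hblen, hcmlen]
          cases P with
          | nil => exact absurd rfl hPe
          | cons p t => simp
        · rw [hblen] at hc
          have hgdc := hgd c hc
          simp only [Nat.zero_add, Nat.zero_le, true_and, Nat.sub_zero] at hgdc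
          obtain ⟨hbound, w, hw, hwlen, hweq⟩ := hinv.2 c hc
          constructor
          · intro x hx hxlen
            rcases List.mem_append.mp hx with hxP | hxr
            · have h1 := hbound x hxP hxlen
              rw [hgdc]
              split
              · exact le_trans h1 (le_max_left _ _)
              · exact h1
            · simp at hxr
              subst hxr
              rw [hgdc, if_pos hxlen]
              exact le_max_right _ _
          · by_cases hcr : c < r.length
            · rw [hgdc, if_pos hcr]
              rcases le_total (r.getD c 0) ((pvBState P).2.getD c 0) with hle | hle
              · exact ⟨w, List.mem_append_left _ hw, hwlen,
                  by rw [hweq, max_eq_left hle]⟩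
              · exact ⟨r, List.mem_append_right _ (by simp), hcr,
                  by rw [max_eq_right hle]⟩
            · rw [hgdc, if_neg hcr]
              exact ⟨w, List.mem_append_left _ hw, hwlen, hweq⟩

-- ===== VERDICT (by name: the statement is the Claim_ definition above) =====
theorem can_not_see_spec : Claim_equal_can_not_see := by
  intro seats _ hP
  unfold Spec_can_not_see
  have h := (pvMainInv seats hP).1
  show can_not_see seats = can_not_see_alt seats
  rw [← h]; rfl
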